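-- pv_equiv track=rewrite | github.com/talhajamal11/mathematical_modelling | src/two_pointers/max_zeros_between_ones.py | max_zeros
-- ===== SOURCE A (Python) =====
-- def max_zeros(N):
--     """
--     return max zeros
--     """
--     num = bin(N)[2:]
--     n = len(num)
--     max_zeros = 0
--     left, right = 0, 0
--     bool_first_one = False
--
--     if n  == 0:
--         return n
--
--     for index, num in enumerate(num):
--         # Find the first 1
--         if bool_first_one is False and num == '1':
--             bool_first_one = True
--             left = index
--             right = index
--         elif bool_first_one is True and num == '0':
--             right += 1
--         elif bool_first_one is True and num == '1':
--             max_zeros = max(max_zeros, right - left)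
--             left = index
--             right = index
--
--     return max_zeros
-- ===== SOURCE B (Python) =====
-- def max_zeros(N):
--     """
--     return max zeros
--     """
--     pieces = bin(N)[2:].split('1')[1:-1]
--     return max((len(p) for p in pieces), default=0)
-- ===== Notes on version B (the rewrite author's own statement) =====
-- stated objective: simpler
-- what changed: Replaces the stateful two-pointer scan over enumerate (left/right indices, first-one flag) with a segment-then-reduce one-liner: split the binary string on '1', keep only the interior pieces ([1:-1], which discards the prefix before the first one and the uncounted trailing zeros), and take the max piece length with default 0.
import Mathlib
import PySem

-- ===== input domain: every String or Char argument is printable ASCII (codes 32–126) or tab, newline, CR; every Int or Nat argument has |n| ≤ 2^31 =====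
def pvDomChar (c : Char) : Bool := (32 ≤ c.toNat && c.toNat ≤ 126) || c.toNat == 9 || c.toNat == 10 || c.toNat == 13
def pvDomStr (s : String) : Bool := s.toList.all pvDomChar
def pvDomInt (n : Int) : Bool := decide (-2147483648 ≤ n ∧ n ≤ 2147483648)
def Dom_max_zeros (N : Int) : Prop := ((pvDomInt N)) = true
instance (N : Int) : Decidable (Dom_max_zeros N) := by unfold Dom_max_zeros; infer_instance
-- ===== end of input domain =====

-- B replaces A's stateful two-pointer scan with split-on-'1' / max over interior piece lengths (same result, simpler).

-- ===== PORT A =====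
-- the loop body of A: state (max_zeros, left, right, bool_first_one), element (index, char)
def maxZerosStep (st : Int × Int × Int × Bool) (p : Int × Char) : Int × Int × Int × Bool :=
  if st.2.2.2 = false ∧ p.2 = '1' then (st.1, p.1, p.1, true)
  else if st.2.2.2 = true ∧ p.2 = '0' then (st.1, st.2.1, st.2.2.1 + 1, st.2.2.2)
  else if st.2.2.2 = true ∧ p.2 = '1' then (max st.1 (st.2.2.1 - st.2.1), p.1, p.1, st.2.2.2)
  else st

def max_zeros (N : Int) : Int :=
  let num : List Char := PySem.List.slice (PySem.Int.toBinChars0b N) (some 2) none   -- bin(N)[2:]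
  let n : Int := PySem.List.len num
  if n = 0 then n
  else ((PySem.List.enumerate num).foldl maxZerosStep (0, 0, 0, false)).1

-- ===== PORT B =====
def max_zeros_alt (N : Int) : Int :=
  let pieces : List (List Char) :=
    PySem.List.slice (PySem.Chars.splitOn (PySem.List.slice (PySem.Int.toBinChars0b N) (some 2) none) ['1'])
      (some 1) (some (-1))                                                            -- bin(N)[2:].split('1')[1:-1]
  PySem.List.maxD (pieces.map (fun p => PySem.List.len p)) (fun x => x) 0             -- max(…, default=0)

-- ===== PRECONDITION & SPEC =====
def Spec_max_zeros (N : Int) (out : Int) : Prop := out = max_zeros_alt N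
instance (N : Int) (out : Int) : Decidable (Spec_max_zeros N out) := by unfold Spec_max_zeros; infer_instance

-- ===== CLAIM (what is proved, stated in full; the proofs are below) =====
def Claim_equal_max_zeros : Prop := ∀ (N : Int), Dom_max_zeros N → Spec_max_zeros N (max_zeros N)

-- ===== LEMMAS AND PROOFS =====

-- clean recursion computing split-on-'1' (proved equal to PySem.Chars.splitOn · ['1'] below)
def sp : List Char → List (List Char)
  | [] => [[]]
  | c :: t => if c = '1' then [] :: sp t else (sp t).modifyHead (c :: ·)

lemma sp_ne_nil (l : List Char) : sp l ≠ [] := by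
  induction l with
  | nil => simp [sp]
  | cons c t ih =>
    simp only [sp]
    split
    · simp
    · cases h : sp t with
      | nil => exact absurd h ih
      | cons p r => simp

lemma go_eq_sp (fuel : Nat) (l cur : List Char) (acc : List (List Char)) (h : l.length ≤ fuel) :
    PySem.Chars.splitOn.go ['1'] fuel l cur acc
      = acc.reverse ++ (sp l).modifyHead (cur.reverse ++ ·) := by
  induction fuel generalizing l cur acc with
  | zero =>
    have hl : l = [] := by cases l <;> simp_all
    subst hl
    simp [PySem.Chars.splitOn.go, sp]
  | succ f ih =>
    cases l with
    | nil => simp [PySem.Chars.splitOn.go, sp]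
    | cons c rest =>
      simp only [PySem.Chars.splitOn.go]
      by_cases hc : c = '1'
      · subst hc
        rw [if_pos (by simp [List.isPrefixOf])]
        rw [show List.drop ['1'].length ('1' :: rest) = rest from rfl]
        rw [ih rest [] _ (by simpa using h)]
        obtain ⟨p, r, hpr⟩ : ∃ p r, sp rest = p :: r := by
          cases hsp : sp rest with
          | nil => exact absurd hsp (sp_ne_nil rest)
          | cons p r => exact ⟨p, r, rfl⟩
        simp [sp, hpr]
      · rw [if_neg (by simp [List.isPrefixOf]; intro h'; exact hc h'.symm)]
        rw [ih rest (c :: cur) acc (by simpa using h)]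
        obtain ⟨p, r, hpr⟩ : ∃ p r, sp rest = p :: r := by
          cases hsp : sp rest with
          | nil => exact absurd hsp (sp_ne_nil rest)
          | cons p r => exact ⟨p, r, rfl⟩
        simp [sp, hc, hpr]

lemma splitOn_eq_sp (l : List Char) : PySem.Chars.splitOn l ['1'] = sp l := by
  unfold PySem.Chars.splitOn
  rw [go_eq_sp _ _ _ _ (by omega)]
  obtain ⟨p, r, hpr⟩ : ∃ p r, sp l = p :: r := by
    cases hsp : sp l with
    | nil => exact absurd hsp (sp_ne_nil l)
    | cons p r => exact ⟨p, r, rfl⟩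
  simp [hpr]

-- xs[1:-1] is tail.dropLast
lemma slice_one_neg_one {α : Type} (l : List α) :
    PySem.List.slice l (some 1) (some (-1)) = l.tail.dropLast := by
  cases l with
  | nil => rfl
  | cons x t =>
    simp only [PySem.List.slice, PySem.List.clampIdx]
    norm_num
    rw [List.dropLast_eq_take]
    congr 1

-- Python max over Int values, default 0
lemma max?_int_foldl (t : List Int) : ∀ a : Int,
    PySem.List.max? (a :: t) (fun x => x) = some (t.foldl max a) := by
  induction t with
  | nil => intro a; rfl
  | cons x r ih =>
    intro a
    have hm : (if a < x then some x else some a) = some (max a x) := by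
      split_ifs with hax
      · rw [max_eq_right hax.le]
      · rw [max_eq_left (not_lt.1 hax)]
    have h2 := ih (max a x)
    simp only [PySem.List.max?, List.foldl_cons] at h2 ⊢
    rw [hm]
    exact h2

lemma maxD_int_foldl (xs : List Int) (h : ∀ x ∈ xs, 0 ≤ x) :
    PySem.List.maxD xs (fun x => x) 0 = xs.foldl max 0 := by
  cases xs with
  | nil => rfl
  | cons a t =>
    rw [PySem.List.maxD, max?_int_foldl t a]
    have : max 0 a = a := by have := h a (by simp); omega
    simp [this]

-- how A's loop body acts in each reachable case
lemma step_unseen_ne (mz l r i : Int) (c : Char) (hc : c ≠ '1') :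
    maxZerosStep (mz, l, r, false) (i, c) = (mz, l, r, false) := by
  simp [maxZerosStep, hc]

lemma step_unseen_one (mz l r i : Int) :
    maxZerosStep (mz, l, r, false) (i, '1') = (mz, i, i, true) := by
  simp [maxZerosStep]

lemma step_seen_zero (mz l r i : Int) :
    maxZerosStep (mz, l, r, true) (i, '0') = (mz, l, r + 1, true) := by
  simp [maxZerosStep]

lemma step_seen_one (mz l r i : Int) :
    maxZerosStep (mz, l, r, true) (i, '1') = (max mz (r - l), i, i, true) := by
  simp [maxZerosStep]

-- the scan after the first '1' was seen: only right-left matters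
def mScan : List Char → Int → Int → Int
  | [], _, mz => mz
  | c :: t, cur, mz => if c = '1' then mScan t 0 (max mz cur) else mScan t (cur + 1) mz

lemma foldl_seen (s : List Char) (hb : ∀ c ∈ s, c = '0' ∨ c = '1') :
    ∀ (i mz l r : Int),
      ((PySem.List.enumerate s i).foldl maxZerosStep (mz, l, r, true)).1 = mScan s (r - l) mz := by
  induction s with
  | nil => intro i mz l r; simp [PySem.List.enumerate_nil, mScan]
  | cons c t ih =>
    intro i mz l r
    have hbt : ∀ c ∈ t, c = '0' ∨ c = '1' := fun x hx => hb x (by simp [hx])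
    rw [PySem.List.enumerate_cons]
    rcases hb c (by simp) with hc | hc <;> subst hc
    · rw [List.foldl_cons, step_seen_zero, ih hbt, mScan]
      rw [if_neg (by decide)]
      congr 1
      omega
    · rw [List.foldl_cons, step_seen_one, ih hbt, mScan]
      rw [if_pos rfl]
      congr 1
      omega

-- the reduce over interior pieces, phrased on the piece list
def gRed : List (List Char) → Int → Int → Int
  | [], _, mz => mz
  | [_], _, mz => mz
  | p :: q :: r, cur, mz => gRed (q :: r) 0 (max mz (cur + p.length))

lemma mScan_eq_gRed (s : List Char) (hb : ∀ c ∈ s, c = '0' ∨ c = '1') :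
    ∀ (cur mz : Int), mScan s cur mz = gRed (sp s) cur mz := by
  induction s with
  | nil => intro cur mz; simp [mScan, sp, gRed]
  | cons c t ih =>
    intro cur mz
    have hbt : ∀ c ∈ t, c = '0' ∨ c = '1' := fun x hx => hb x (by simp [hx])
    obtain ⟨p, r, hpr⟩ : ∃ p r, sp t = p :: r := by
      cases hsp : sp t with
      | nil => exact absurd hsp (sp_ne_nil t)
      | cons p r => exact ⟨p, r, rfl⟩
    rcases hb c (by simp) with hc | hc <;> subst hc
    · simp only [mScan, sp, if_neg (by decide : ¬ ('0' = '1')), hpr, List.modifyHead]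
      rw [ih hbt]
      rw [hpr]
      cases r with
      | nil => simp [gRed]
      | cons q r' =>
        simp only [gRed, List.length_cons]
        congr 2
        push_cast
        ring
    · simp only [mScan, sp, hpr]
      rw [ih hbt]
      rw [hpr]
      simp [gRed]

lemma gRed_eq_foldl (pieces : List (List Char)) :
    ∀ mz : Int, gRed pieces 0 mz
      = (pieces.dropLast.map (fun p => (p.length : Int))).foldl max mz := by
  induction pieces with
  | nil => intro mz; simp [gRed]
  | cons p rest ih =>
    intro mz
    cases rest with
    | nil => simp [gRed]
    | cons q r =>
      simp only [gRed, List.dropLast_cons₂, List.map_cons, List.foldl_cons]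
      rw [ih]
      norm_num

-- the full scan from the initial state, on a string whose chars are all '0'/'1'
lemma foldl_prescan (s : List Char) (hb : ∀ c ∈ s, c = '0' ∨ c = '1') (i : Int) :
    ((PySem.List.enumerate s i).foldl maxZerosStep (0, 0, 0, false)).1
      = ((sp s).tail.dropLast.map (fun p => (p.length : Int))).foldl max 0 := by
  induction s generalizing i with
  | nil => simp [PySem.List.enumerate_nil, sp]
  | cons c t ih =>
    have hbt : ∀ c ∈ t, c = '0' ∨ c = '1' := fun x hx => hb x (by simp [hx])
    rw [PySem.List.enumerate_cons]
    rcases hb c (by simp) with hc | hc <;> subst hc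
    · rw [List.foldl_cons, step_unseen_ne _ _ _ _ _ (by decide), ih hbt (i + 1)]
      simp [sp, List.tail_modifyHead]
    · rw [List.foldl_cons, step_unseen_one]
      rw [foldl_seen t hbt (i + 1) 0 i i, mScan_eq_gRed t hbt, sub_self, gRed_eq_foldl]
      simp [sp]

-- every char of Nat.toDigits 2 n is '0' or '1'
lemma toDigitsCore_binary (fuel : Nat) : ∀ (n : Nat) (acc : List Char),
    ∀ c ∈ Nat.toDigitsCore 2 fuel n acc, (c = '0' ∨ c = '1') ∨ c ∈ acc := by
  induction fuel with
  | zero => intro n acc c hc; exact Or.inr hc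
  | succ f ih =>
    intro n acc c hc
    have hd : Nat.digitChar (n % 2) = '0' ∨ Nat.digitChar (n % 2) = '1' := by
      rcases Nat.mod_two_eq_zero_or_one n with h | h <;> simp [h, Nat.digitChar]
    simp only [Nat.toDigitsCore] at hc
    split at hc
    · rcases List.mem_cons.mp hc with h | h
      · exact Or.inl (h ▸ hd)
      · exact Or.inr h
    · rcases ih (n / 2) _ c hc with h | h
      · exact Or.inl h
      · rcases List.mem_cons.mp h with h' | h'
        · exact Or.inl (h' ▸ hd)
        · exact Or.inr h'

lemma toDigits_binary (n : Nat) : ∀ c ∈ Nat.toDigits 2 n, c = '0' ∨ c = '1' := by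
  intro c hc
  rcases toDigitsCore_binary (n + 1) n [] c hc with h | h
  · exact h
  · simp at h

lemma toDigitsCore_ne_nil (fuel : Nat) : ∀ (n : Nat) (acc : List Char),
    acc ≠ [] → Nat.toDigitsCore 2 fuel n acc ≠ [] := by
  induction fuel with
  | zero => intro n acc h; simpa [Nat.toDigitsCore]
  | succ f ih =>
    intro n acc h
    simp only [Nat.toDigitsCore]
    split
    · simp
    · exact ih _ _ (by simp)

lemma toDigits_ne_nil (n : Nat) : Nat.toDigits 2 n ≠ [] := by
  show Nat.toDigitsCore 2 (n + 1) n [] ≠ []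
  simp only [Nat.toDigitsCore]
  split
  · simp
  · exact toDigitsCore_ne_nil _ _ _ (by simp)

-- A's value = B's value on any string all of whose chars are '0'/'1', after a possible non-'1' lead char
lemma core_eq (s : List Char) (hb : ∀ c ∈ s, c = '0' ∨ c = '1') (i : Int) :
    ((PySem.List.enumerate s i).foldl maxZerosStep (0, 0, 0, false)).1
      = PySem.List.maxD (((sp s).tail.dropLast).map (fun p => PySem.List.len p)) (fun x => x) 0 := by
  rw [foldl_prescan s hb i, maxD_int_foldl]
  · simp [PySem.List.len]
  · intro x hx
    simp only [List.mem_map] at hx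
    obtain ⟨p, _, hp⟩ := hx
    simp [PySem.List.len] at hp
    omega

-- ===== VERDICT (by name: the statement is the Claim_ definition above) =====
theorem max_zeros_spec : Claim_equal_max_zeros := by
  intro N _
  show max_zeros N = max_zeros_alt N
  unfold max_zeros max_zeros_alt
  rw [PySem.Int.toBinChars0b]
  by_cases hneg : N < 0
  · rw [if_pos hneg]
    have hdrop : PySem.List.slice ('-' :: '0' :: 'b' :: Nat.toDigits 2 N.natAbs) (some 2) none
        = 'b' :: Nat.toDigits 2 N.natAbs := by
      rw [PySem.List.slice_from _ (by norm_num)]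
      rfl
    rw [hdrop]
    have hne : PySem.List.len ('b' :: Nat.toDigits 2 N.natAbs) ≠ 0 := by
      simp only [PySem.List.len_eq]
      intro h
      simp only [List.length_cons] at h
      omega
    rw [if_neg hne]
    rw [splitOn_eq_sp, slice_one_neg_one]
    rw [PySem.List.enumerate_cons, List.foldl_cons]
    have hstep : maxZerosStep (0, 0, 0, false) (0, 'b') = (0, 0, 0, false) := by decide
    rw [hstep]
    rw [core_eq _ (toDigits_binary N.natAbs) (0 + 1)]
    simp [sp, List.tail_modifyHead]
  · rw [if_neg hneg]
    have hdrop : PySem.List.slice ('0' :: 'b' :: Nat.toDigits 2 N.toNat) (some 2) none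
        = Nat.toDigits 2 N.toNat := by
      rw [PySem.List.slice_from _ (by norm_num)]
      rfl
    rw [hdrop]
    have hne : PySem.List.len (Nat.toDigits 2 N.toNat) ≠ 0 := by
      have h1 := toDigits_ne_nil N.toNat
      simp only [PySem.List.len_eq]
      intro h
      have h2 : (Nat.toDigits 2 N.toNat).length = 0 := by exact_mod_cast h
      exact h1 (List.length_eq_zero_iff.mp h2)
    rw [if_neg hne]
    rw [splitOn_eq_sp, slice_one_neg_one]
    exact core_eq _ (toDigits_binary N.toNat) 0
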